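-- pv_equiv track=rewrite | github.com/thespoonftw/adventofcode2020python | day06.py | part2
-- ===== SOURCE A (Python) =====
-- def part2(lines) -> int:
--
--     counter = 0
--     length = len(lines)
--     i = 0
--
--     while i < length:
--
--         mySet = set(lines[i])
--         i += 1
--
--         while (i < length and lines[i] != ""):
--
--             mySet = mySet & set(lines[i])
--             i += 1
--
--
--         counter += len(mySet)
--         i += 1
--
--     return counter
-- ===== SOURCE B (Python) =====
-- def part2(lines) -> int:
--     # pass 1: split into groups; a group starts at index 0 and right after each
--     # blank separator, and its first line is taken unconditionally (even if blank)
--     groups = []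
--     cur = None
--     for line in lines:
--         if cur is None:
--             cur = [line]
--         elif line == "":
--             groups.append(cur)
--             cur = None
--         else:
--             cur.append(line)
--     if cur is not None:
--         groups.append(cur)
--     # pass 2: intersect each group and sum the sizes
--     return sum(len(set(g[0]).intersection(*g[1:])) for g in groups)
-- ===== Notes on version B (the rewrite author's own statement) =====
-- stated objective: alternative
-- what changed: Replaces A's index-driven nested while loops by a two-pass decomposition: a single fold that splits the lines into groups (first line of each group taken unconditionally, reproducing the blank-seeded-group behaviour), then a per-group set intersection summed up.
import Mathlib
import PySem

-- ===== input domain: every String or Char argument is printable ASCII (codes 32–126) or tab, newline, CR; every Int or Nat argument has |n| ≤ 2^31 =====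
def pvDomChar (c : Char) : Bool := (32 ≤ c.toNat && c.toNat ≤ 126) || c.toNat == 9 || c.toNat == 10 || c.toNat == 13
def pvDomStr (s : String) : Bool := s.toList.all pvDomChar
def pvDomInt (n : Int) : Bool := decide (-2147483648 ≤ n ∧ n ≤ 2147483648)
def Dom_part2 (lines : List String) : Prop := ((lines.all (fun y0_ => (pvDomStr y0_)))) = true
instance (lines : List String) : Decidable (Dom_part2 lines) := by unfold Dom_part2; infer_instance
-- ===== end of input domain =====

-- B changes the decomposition: one grouping pass plus a per-group set-intersection sum, instead of A's index-driven nested while loops (objective: alternative).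

-- ===== PORT A =====
-- inner 'while (i < length and lines[i] != "")': intersect into mySet, return the set and the remaining suffix
def part2Inner : List String → PySem.Set Char → PySem.Set Char × List String
  | [], s => (s, [])
  | l :: rest, s =>
      if l ≠ "" then part2Inner rest (PySem.Set.inter s l.toList)
      else (s, l :: rest)

lemma part2Inner_length_le : ∀ (xs : List String) (s : PySem.Set Char),
    (part2Inner xs s).2.length ≤ xs.length
  | [], _ => by simp [part2Inner]
  | l :: rest, s => by
      by_cases h : l = "" <;> simp [part2Inner, h]
      exact Nat.le_succ_of_le (part2Inner_length_le rest _)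

-- outer 'while i < length' of A, with the suffix of lines standing for index i
def part2Outer : List String → Int → Int
  | [], c => c
  | l :: rest, c =>
      let p := part2Inner rest (PySem.Set.ofList l.toList)
      part2Outer p.2.tail (c + (PySem.Set.len p.1 : Int))
termination_by xs _ => xs.length
decreasing_by
  have h := part2Inner_length_le rest (PySem.Set.ofList l.toList)
  simp only [List.length_tail, List.length_cons]; omega

def part2 (lines : List String) : Int := part2Outer lines 0

-- ===== PORT B =====
-- one step of B's grouping fold: state = (closed groups, current open group or None)
def part2Step (st : List (List String) × Option (List String)) (line : String) :
    List (List String) × Option (List String) :=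
  match st.2 with
  | none => (st.1, some [line])
  | some cur => if line = "" then (st.1 ++ [cur], none) else (st.1, some (cur ++ [line]))

-- len(set(g[0]).intersection(*g[1:])); groups built by B are nonempty, the [] case is unreachable
def part2GroupLen : List String → Int
  | [] => 0
  | h :: t => (PySem.Set.len (t.foldl (fun s l => PySem.Set.inter s l.toList) (PySem.Set.ofList h.toList)) : Int)

def part2_alt (lines : List String) : Int :=
  let st := lines.foldl part2Step ([], none)
  let groups := st.1 ++ (match st.2 with | some c => [c] | none => [])
  (groups.map part2GroupLen).sum

-- ===== PRECONDITION & SPEC =====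
def Spec_part2 (lines : List String) (out : Int) : Prop := out = part2_alt lines
instance (lines : List String) (out : Int) : Decidable (Spec_part2 lines out) := by unfold Spec_part2; infer_instance

-- ===== CLAIM (what is proved, stated in full; the proofs are below) =====
def Claim_equal_part2 : Prop := ∀ (lines : List String), Dom_part2 lines → Spec_part2 lines (part2 lines)

-- ===== LEMMAS AND PROOFS =====

-- the common group structure both programs compute over
def groupsOf : List String → List (List String)
  | [] => []
  | l :: rest =>
      (l :: rest.takeWhile (· ≠ "")) :: groupsOf (rest.dropWhile (· ≠ "")).tail
termination_by xs => xs.length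
decreasing_by
  have h : (rest.dropWhile (· ≠ "")).length ≤ rest.length := List.length_dropWhile_le _ _
  simp only [List.length_tail, List.length_cons]; omega

lemma groupsOf_nil : groupsOf [] = [] := by rw [groupsOf.eq_def]

lemma groupsOf_cons (l : String) (rest : List String) :
    groupsOf (l :: rest)
      = (l :: rest.takeWhile (· ≠ "")) :: groupsOf (rest.dropWhile (· ≠ "")).tail := by
  rw [groupsOf.eq_def]

lemma part2Inner_spec : ∀ (xs : List String) (s : PySem.Set Char),
    part2Inner xs s
      = ((xs.takeWhile (· ≠ "")).foldl (fun s l => PySem.Set.inter s l.toList) s,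
          xs.dropWhile (· ≠ ""))
  | [], s => by simp [part2Inner]
  | l :: rest, s => by
      by_cases h : l = "" <;>
        simp [part2Inner, List.takeWhile, List.dropWhile, h, part2Inner_spec rest]

lemma part2Outer_eq_groups : ∀ (xs : List String) (c : Int),
    part2Outer xs c = c + ((groupsOf xs).map part2GroupLen).sum := by
  intro xs
  induction xs using groupsOf.induct with
  | case1 => intro c; rw [part2Outer.eq_def, groupsOf_nil]; simp
  | case2 l rest ih =>
      intro c
      rw [part2Outer.eq_def, groupsOf_cons]
      simp only [part2Inner_spec, List.map_cons, List.sum_cons]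
      rw [ih]
      simp only [part2GroupLen]
      ring

lemma part2Fold_open : ∀ (n : Nat) (xs : List String), xs.length ≤ n →
    ∀ (gs : List (List String)) (cur : List String),
    (let st := xs.foldl part2Step (gs, some cur)
     ((st.1 ++ (match st.2 with | some c => [c] | none => [])).map part2GroupLen).sum)
      = (gs.map part2GroupLen).sum + part2GroupLen (cur ++ xs.takeWhile (· ≠ ""))
          + ((groupsOf (xs.dropWhile (· ≠ "")).tail).map part2GroupLen).sum := by
  intro n
  induction n with
  | zero =>
      intro xs h gs cur
      have : xs = [] := List.eq_nil_of_length_eq_zero (Nat.le_zero.mp h)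
      subst this
      simp [groupsOf]
  | succ n ih =>
      intro xs h gs cur
      match xs with
      | [] => simp [groupsOf_nil]
      | l :: rest =>
        simp only [List.length_cons] at h
        by_cases hl : l = ""
        · subst hl
          rw [List.foldl_cons,
              show part2Step (gs, some cur) "" = (gs ++ [cur], none) from by
                simp [part2Step]]
          rw [show List.takeWhile (fun x => decide (x ≠ "")) ("" :: rest) = [] from by
                simp,
              show List.dropWhile (fun x => decide (x ≠ "")) ("" :: rest) = "" :: rest from by
                simp]
          rw [List.tail_cons]
          match rest with
          | [] => simp [groupsOf_nil]
          | l2 :: rest2 =>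
              rw [List.foldl_cons,
                  show part2Step (gs ++ [cur], none) l2 = (gs ++ [cur], some [l2]) from rfl]
              rw [ih rest2 (by simp only [List.length_cons] at h; omega) (gs ++ [cur]) [l2]]
              rw [groupsOf_cons]
              simp
              ring
        · rw [List.foldl_cons,
              show part2Step (gs, some cur) l = (gs, some (cur ++ [l])) from by
                simp [part2Step, hl]]
          rw [ih rest (by omega) gs (cur ++ [l])]
          rw [List.takeWhile_cons, List.dropWhile_cons]
          simp [hl]

-- ===== VERDICT (by name: the statement is the Claim_ definition above) =====
theorem part2_spec : Claim_equal_part2 := by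
  intro lines _
  unfold Spec_part2 part2 part2_alt
  rw [part2Outer_eq_groups]
  match lines with
  | [] => simp [groupsOf_nil]
  | l :: rest =>
      simp only [List.foldl_cons]
      rw [show (part2Step ([], none) l) = ([], some [l]) from rfl]
      rw [part2Fold_open rest.length rest (le_refl _) [] [l]]
      rw [groupsOf_cons]
      simp
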